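-- pv_equiv track=rewrite | github.com/emiyajojo/Chi_Spell_Correct | post_processor.py | _unk_flashback_one
-- ===== SOURCE A (Python) =====
-- UNK_TOKEN = "[UNK]"
--
-- def _unk_flashback_one(original: str, predicted: str) -> str:
--     """将 predicted 中的 [UNK] 按位置用 original 对应字符回填。"""
--     if not original:
--         return predicted
--     orig_idx = 0
--     result = []
--     i = 0
--     n = len(predicted)
--     while i < n:
--         if i + len(UNK_TOKEN) <= n and predicted[i : i + len(UNK_TOKEN)] == UNK_TOKEN:
--             result.append(original[orig_idx] if orig_idx < len(original) else "?")
--             orig_idx += 1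
--             i += len(UNK_TOKEN)
--         else:
--             result.append(predicted[i])
--             orig_idx += 1
--             i += 1
--     return "".join(result)
-- ===== SOURCE B (Python) =====
-- UNK_TOKEN = "[UNK]"
--
-- def _unk_flashback_one(original: str, predicted: str) -> str:
--     if not original:
--         return predicted
--     parts = predicted.split(UNK_TOKEN)
--     out = []
--     pos = 0
--     for k, part in enumerate(parts):
--         if k:
--             out.append(original[pos] if pos < len(original) else "?")
--             pos += 1
--         out.append(part)
--         pos += len(part)
--     return "".join(out)
-- ===== Notes on version B (the rewrite author's own statement) =====
-- stated objective: simpler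
-- what changed: Replaces the character-by-character while loop with windowed substring comparison by a single str.split on the [UNK] token plus a running output-position counter used to backfill one original character at each split boundary.
import Mathlib
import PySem

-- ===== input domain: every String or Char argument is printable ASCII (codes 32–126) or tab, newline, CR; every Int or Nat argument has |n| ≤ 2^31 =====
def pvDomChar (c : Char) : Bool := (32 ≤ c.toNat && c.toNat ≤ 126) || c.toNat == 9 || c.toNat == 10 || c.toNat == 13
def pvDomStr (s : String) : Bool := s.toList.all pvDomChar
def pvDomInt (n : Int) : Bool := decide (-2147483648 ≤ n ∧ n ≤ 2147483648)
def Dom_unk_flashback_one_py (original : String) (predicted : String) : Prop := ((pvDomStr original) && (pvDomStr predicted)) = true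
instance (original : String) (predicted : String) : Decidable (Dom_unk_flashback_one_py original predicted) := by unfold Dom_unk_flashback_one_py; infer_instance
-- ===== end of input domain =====

-- B replaces A's character-by-character scan (with windowed substring compare) by a
-- split-on-token pass plus a running output-position counter; objective: simpler.


-- ===== PORT A =====
-- UNK_TOKEN = "[UNK]" as a character list
def unkTokA : List Char := ['[', 'U', 'N', 'K', ']']

-- the while loop: i advances by 5 on a token match (predicted[i:i+5] == UNK_TOKEN), else by 1;
-- `rest` is predicted[i:], so `rest.take 5 = unkTokA` iff i+5 ≤ n ∧ slice match.
-- `orig.getD origIdx '?'` is exactly `original[orig_idx] if orig_idx < len(original) else "?"`.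
def goA (orig : List Char) (origIdx : Nat) (rest : List Char) : List Char :=
  match rest with
  | [] => []
  | c :: rs =>
    if (c :: rs).take 5 = unkTokA then
      orig.getD origIdx '?' :: goA orig (origIdx + 1) ((c :: rs).drop 5)
    else
      c :: goA orig (origIdx + 1) rs
termination_by rest.length
decreasing_by
  all_goals simp [List.length_drop]

def unk_flashback_one_py (original : String) (predicted : String) : String :=
  if original = "" then predicted
  else String.ofList (goA original.toList 0 predicted.toList)

-- ===== PORT B =====
def unkTokB : List Char := ['[', 'U', 'N', 'K', ']']

-- predicted.split("[UNK]"): leftmost, non-overlapping occurrences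
def splitTokB (l : List Char) : List (List Char) :=
  match l with
  | [] => [[]]
  | c :: rs =>
    if (c :: rs).take 5 = unkTokB then
      [] :: splitTokB ((c :: rs).drop 5)
    else
      match splitTokB rs with
      | p :: ps => (c :: p) :: ps
      | [] => [[c]]
termination_by l.length
decreasing_by
  all_goals simp [List.length_drop]

-- the for-loop body from the second part on: backfill one char, then the part
def glueRestB (orig : List Char) (pos : Nat) (parts : List (List Char)) : List Char :=
  match parts with
  | [] => []
  | p :: ps => orig.getD pos '?' :: (p ++ glueRestB orig (pos + 1 + p.length) ps)

-- first iteration (k = 0): just the part, then the rest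
def glueB (orig : List Char) (pos : Nat) (parts : List (List Char)) : List Char :=
  match parts with
  | [] => []
  | p :: ps => p ++ glueRestB orig (pos + p.length) ps

def unk_flashback_one_py_alt (original : String) (predicted : String) : String :=
  if original = "" then predicted
  else String.ofList (glueB original.toList 0 (splitTokB predicted.toList))

-- ===== PRECONDITION & SPEC =====
def Spec_unk_flashback_one_py (original : String) (predicted : String) (out : String) : Prop := out = unk_flashback_one_py_alt original predicted
instance (original : String) (predicted : String) (out : String) : Decidable (Spec_unk_flashback_one_py original predicted out) := by unfold Spec_unk_flashback_one_py; infer_instance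

-- ===== CLAIM (what is proved, stated in full; the proofs are below) =====
def Claim_equal_unk_flashback_one_py : Prop := ∀ (original : String) (predicted : String), Dom_unk_flashback_one_py original predicted → Spec_unk_flashback_one_py original predicted (unk_flashback_one_py original predicted)

-- ===== LEMMAS AND PROOFS =====

theorem splitTokB_ne_nil (l : List Char) : splitTokB l ≠ [] := by
  unfold splitTokB
  split
  · simp
  · split
    · simp
    · split <;> simp

theorem glueRestB_cons (orig : List Char) (pos : Nat) (p : List Char) (ps : List (List Char)) :
    glueRestB orig pos (p :: ps) = orig.getD pos '?' :: glueB orig (pos + 1) (p :: ps) := by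
  simp [glueRestB, glueB]

theorem goA_eq_glue (orig : List Char) :
    ∀ (n : Nat) (rest : List Char), rest.length ≤ n → ∀ (idx : Nat),
      goA orig idx rest = glueB orig idx (splitTokB rest) := by
  intro n
  induction n with
  | zero =>
    intro rest h idx
    have : rest = [] := List.eq_nil_of_length_eq_zero (Nat.le_zero.mp h)
    subst this
    simp [goA, splitTokB, glueB, glueRestB]
  | succ m ih =>
    intro rest h idx
    match rest with
    | [] => simp [goA, splitTokB, glueB, glueRestB]
    | c :: rs =>
      by_cases htok : (c :: rs).take 5 = unkTokA
      · have hB : (c :: rs).take 5 = unkTokB := htok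
        simp only [goA, splitTokB]
        rw [if_pos htok, if_pos hB]
        have hlen : ((c :: rs).drop 5).length ≤ m := by
          simp only [List.length_cons] at h
          simp [List.length_drop]; omega
        rw [ih _ hlen (idx + 1)]
        rcases hne : splitTokB ((c :: rs).drop 5) with _ | ⟨p, ps⟩
        · exact absurd hne (splitTokB_ne_nil _)
        · rw [show glueB orig idx ([] :: p :: ps) =
                glueRestB orig idx (p :: ps) by simp [glueB]]
          rw [glueRestB_cons]
      · have hB : ¬ (c :: rs).take 5 = unkTokB := htok
        simp only [goA, splitTokB]
        rw [if_neg htok, if_neg hB]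
        have hlen : rs.length ≤ m := by
          simp only [List.length_cons] at h; omega
        rw [ih _ hlen (idx + 1)]
        rcases hne : splitTokB rs with _ | ⟨p, ps⟩
        · exact absurd hne (splitTokB_ne_nil _)
        · have harg : idx + (p.length + 1) = idx + 1 + p.length := by omega
          simp [glueB, harg]

-- ===== VERDICT (by name: the statement is the Claim_ definition above) =====
theorem unk_flashback_one_py_spec : Claim_equal_unk_flashback_one_py := by
  intro original predicted _
  unfold Spec_unk_flashback_one_py unk_flashback_one_py unk_flashback_one_py_alt
  by_cases h : original = ""
  · simp [h]
  · simp only [h, if_neg, not_false_iff]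
    rw [goA_eq_glue original.toList predicted.toList.length predicted.toList le_rfl 0]
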